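-- pv_equiv track=rewrite | github.com/CitrineInformatics/pypif | pypif/interop/mdf.py | _construct_new_key
-- ===== SOURCE A (Python) =====
-- def _construct_new_key(name, units=None):
--     """Construct an MDF safe key from the name and units"""
--     cat = name
--     if units:
--         cat = "_".join([name, units])
--     to_remove = ["/", "\\", "*", "^", "#", " ", "\n", "\t"]
--     for c in to_remove:
--        cat = cat.replace(c, "_")
--     return cat
-- ===== SOURCE B (Python) =====
-- def _construct_new_key(name, units=None):
--     """Construct an MDF safe key from the name and units"""
--     cat = name
--     if units:
--         cat = "_".join([name, units])
--     bad = {"/", "\\", "*", "^", "#", " ", "\n", "\t"}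
--     return "".join("_" if ch in bad else ch for ch in cat)
-- ===== Notes on version B (the rewrite author's own statement) =====
-- stated objective: simpler
-- what changed: Replaces the eight sequential full-string replace() scans with a single character-by-character pass that maps each character via one set membership test.
import Mathlib
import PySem

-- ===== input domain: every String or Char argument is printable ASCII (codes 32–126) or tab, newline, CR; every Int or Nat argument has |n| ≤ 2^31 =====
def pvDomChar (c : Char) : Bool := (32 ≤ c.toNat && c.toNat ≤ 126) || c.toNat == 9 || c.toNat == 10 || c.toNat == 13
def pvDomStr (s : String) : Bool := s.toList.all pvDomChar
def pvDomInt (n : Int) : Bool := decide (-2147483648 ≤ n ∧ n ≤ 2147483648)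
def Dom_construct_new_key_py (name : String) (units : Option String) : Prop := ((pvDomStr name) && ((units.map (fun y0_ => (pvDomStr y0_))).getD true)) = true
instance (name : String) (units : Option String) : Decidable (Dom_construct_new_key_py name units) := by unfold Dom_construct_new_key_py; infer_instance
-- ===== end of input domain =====

-- B does one character-by-character pass with a set membership test instead of A's eight
-- sequential full-string replace scans; objective: simpler (same output on all inputs).

-- ===== PORT A =====
-- `cat = name; if units: cat = "_".join([name, units])`, then eight replace passes in order.
def construct_new_key_py (name : String) (units : Option String) : String :=
  let cat : String :=
    match units with
    | none => name
    | some u => if u = "" then name else PySem.Str.join "_" [name, u]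
  (["/", "\\", "*", "^", "#", " ", "\n", "\t"] : List String).foldl
    (fun acc c => PySem.Str.replace acc c "_") cat

-- ===== PORT B =====
-- single pass: each character of `cat` maps to '_' iff it lies in the 8-element set.
def pvBadChars : PySem.Set Char :=
  PySem.Set.ofList ['/', '\\', '*', '^', '#', ' ', '\n', '\t']

def construct_new_key_py_alt (name : String) (units : Option String) : String :=
  let cat : String :=
    match units with
    | none => name
    | some u => if u = "" then name else PySem.Str.join "_" [name, u]
  String.ofList (cat.toList.map (fun ch => if pvBadChars.contains ch then '_' else ch))

-- ===== PRECONDITION & SPEC =====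
def Spec_construct_new_key_py (name : String) (units : Option String) (out : String) : Prop := out = construct_new_key_py_alt name units
instance (name : String) (units : Option String) (out : String) : Decidable (Spec_construct_new_key_py name units out) := by unfold Spec_construct_new_key_py; infer_instance

-- ===== CLAIM (what is proved, stated in full; the proofs are below) =====
def Claim_equal_construct_new_key_py : Prop := ∀ (name : String) (units : Option String), Dom_construct_new_key_py name units → Spec_construct_new_key_py name units (construct_new_key_py name units)

-- ===== LEMMAS AND PROOFS =====

-- replacing a single character `c` by a single character `d` is a per-character map
lemma replace_go_single (c d : Char) :
    ∀ (fuel : Nat) (l acc : List Char), l.length ≤ fuel →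
      PySem.Chars.replace.go [c] [d] fuel l acc
        = acc.reverse ++ l.map (fun x => if x = c then d else x) := by
  intro fuel
  induction fuel with
  | zero =>
      intro l acc h
      have : l = [] := List.length_eq_zero_iff.mp (Nat.le_zero.mp h)
      subst this
      simp [PySem.Chars.replace.go]
  | succ n ih =>
      intro l acc h
      cases l with
      | nil => simp [PySem.Chars.replace.go]
      | cons x t =>
          by_cases hx : x = c
          · subst hx
            have hp : List.isPrefixOf [x] (x :: t) = true := by
              simp [List.isPrefixOf]
            simp only [PySem.Chars.replace.go, hp, if_true, List.length_cons,
              List.length_nil, List.drop_succ_cons, List.drop_zero]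
            rw [ih t _ (by simpa using Nat.le_of_succ_le_succ h)]
            simp
          · have hp : List.isPrefixOf [c] (x :: t) = false := by
              simp [List.isPrefixOf]
              intro hc; exact hx hc.symm
            simp only [PySem.Chars.replace.go, hp]
            rw [ih t _ (by simpa using Nat.le_of_succ_le_succ h)]
            simp [hx]

lemma replace_single (c d : Char) (cs : List Char) :
    PySem.Chars.replace cs [c] [d] = cs.map (fun x => if x = c then d else x) := by
  simp only [PySem.Chars.replace, List.isEmpty_cons, Bool.false_eq_true, if_false]
  exact replace_go_single c d cs.length cs [] (le_refl _)

-- toList of the eight one-character string literals (and "_"), evaluated once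
lemma pv_toList_slash : ("/" : String).toList = ['/'] := by decide
lemma pv_toList_bslash : ("\\" : String).toList = ['\\'] := by decide
lemma pv_toList_star : ("*" : String).toList = ['*'] := by decide
lemma pv_toList_caret : ("^" : String).toList = ['^'] := by decide
lemma pv_toList_hash : ("#" : String).toList = ['#'] := by decide
lemma pv_toList_space : (" " : String).toList = [' '] := by decide
lemma pv_toList_nl : ("\n" : String).toList = ['\n'] := by decide
lemma pv_toList_tab : ("\t" : String).toList = ['\t'] := by decide
lemma pv_toList_us : ("_" : String).toList = ['_'] := by decide

-- ===== VERDICT (by name: the statement is the Claim_ definition above) =====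
-- one of A's replace passes, per character (named so terms stay shared, not beta-expanded)
def pvRep (c : Char) (x : Char) : Char := if x = c then '_' else x

lemma pvRep_ne {x c : Char} (h : ¬ x = c) : pvRep c x = x := by
  simp [pvRep, h]

lemma replace_single' (c : Char) (cs : List Char) :
    PySem.Chars.replace cs [c] ['_'] = cs.map (pvRep c) := replace_single c '_' cs

-- the composition of the eight passes is B's single set-membership test, pointwise …
lemma pv_point (x : Char) :
    pvRep '\t' (pvRep '\n' (pvRep ' ' (pvRep '#' (pvRep '^' (pvRep '*' (pvRep '\\' (pvRep '/' x)))))))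
      = (if pvBadChars.contains x then '_' else x) := by
  have hc : pvBadChars.contains x = true ↔ x ∈ (['/', '\\', '*', '^', '#', ' ', '\n', '\t'] : List Char) := by
    rw [pvBadChars, PySem.Set.contains, List.contains_iff_mem, PySem.Set.mem_ofList]
  by_cases h : x ∈ (['/', '\\', '*', '^', '#', ' ', '\n', '\t'] : List Char)
  · rw [if_pos (hc.mpr h)]
    simp only [List.mem_cons, List.not_mem_nil, or_false] at h
    rcases h with rfl | rfl | rfl | rfl | rfl | rfl | rfl | rfl <;> rfl
  · rw [if_neg (fun hh => h (hc.mp hh))]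
    simp only [List.mem_cons, List.not_mem_nil, or_false, not_or] at h
    obtain ⟨h1, h2, h3, h4, h5, h6, h7, h8⟩ := h
    rw [pvRep_ne h1, pvRep_ne h2, pvRep_ne h3, pvRep_ne h4, pvRep_ne h5, pvRep_ne h6,
      pvRep_ne h7, pvRep_ne h8]

-- … and therefore on whole character lists
lemma pv_chain (l : List Char) :
    List.map (pvRep '\t')
      (List.map (pvRep '\n')
        (List.map (pvRep ' ')
          (List.map (pvRep '#')
            (List.map (pvRep '^')
              (List.map (pvRep '*')
                (List.map (pvRep '\\')
                  (List.map (pvRep '/') l)))))))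
      = List.map (fun ch => if pvBadChars.contains ch then '_' else ch) l := by
  induction l with
  | nil => rfl
  | cons a t ih =>
      simp only [List.map_cons, ih]
      rw [pv_point a]

set_option maxHeartbeats 800000 in
theorem construct_new_key_py_spec : Claim_equal_construct_new_key_py := by
  intro name units _
  unfold Spec_construct_new_key_py construct_new_key_py construct_new_key_py_alt
  apply String.toList_inj.mp
  simp only [List.foldl_cons, List.foldl_nil, PySem.Str.toList_replace]
  simp only [pv_toList_slash, pv_toList_bslash, pv_toList_star, pv_toList_caret,
    pv_toList_hash, pv_toList_space, pv_toList_nl, pv_toList_tab, pv_toList_us]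
  simp only [replace_single', String.toList_ofList]
  exact pv_chain _
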